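-- pv_equiv track=rewrite | github.com/javaComSci/Rhythm | Backend/NotesRecognization/partition.py | prune_runs
-- ===== SOURCE A (Python) =====
-- def prune_runs(runs):
-- 	pruned = []
--
-- 	new_set = []
--
-- 	#for every run
-- 	for r in runs:
-- 		#if new set is empty, add the run
-- 		if len(new_set) == 0:
-- 			new_set.append(r)
-- 		# if the current run is within 1 pixel of the previous run add it set
-- 		elif abs(new_set[len(new_set) - 1] - r) <= 2:
-- 			new_set.append(r)
-- 		#add new set as it's own singular run
-- 		else:
-- 			pruned.append(new_set)
-- 			new_set = []
--
-- 	#append final set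
-- 	pruned.append(new_set)
--
-- 	final_runs = []
--
-- 	#find average of all rows in each run
-- 	for s in pruned:
-- 		final_runs.append(int(float(sum(s))/len(s)))
--
-- 	return final_runs
-- ===== SOURCE B (Python) =====
-- def prune_runs(runs):
--     # One fused pass: running sum/count/last-value accumulators instead of
--     # building the list of groups and averaging in a second pass.
--     final_runs = []
--     cur_sum = 0
--     cur_cnt = 0
--     prev = 0
--     for r in runs:
--         if cur_cnt == 0:
--             cur_sum, cur_cnt, prev = r, 1, r
--         elif abs(prev - r) <= 2:
--             cur_sum += r
--             cur_cnt += 1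
--             prev = r
--         else:
--             final_runs.append(int(float(cur_sum) / cur_cnt))
--             cur_sum = 0
--             cur_cnt = 0
--     final_runs.append(int(float(cur_sum) / cur_cnt))
--     return final_runs
-- ===== Notes on version B (the rewrite author's own statement) =====
-- stated objective: simpler
-- what changed: Fuses A's two passes (build a list of groups, then average each group) into one pass that keeps only running sum/count/last-value accumulators and never materializes the groups.
import Mathlib
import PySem

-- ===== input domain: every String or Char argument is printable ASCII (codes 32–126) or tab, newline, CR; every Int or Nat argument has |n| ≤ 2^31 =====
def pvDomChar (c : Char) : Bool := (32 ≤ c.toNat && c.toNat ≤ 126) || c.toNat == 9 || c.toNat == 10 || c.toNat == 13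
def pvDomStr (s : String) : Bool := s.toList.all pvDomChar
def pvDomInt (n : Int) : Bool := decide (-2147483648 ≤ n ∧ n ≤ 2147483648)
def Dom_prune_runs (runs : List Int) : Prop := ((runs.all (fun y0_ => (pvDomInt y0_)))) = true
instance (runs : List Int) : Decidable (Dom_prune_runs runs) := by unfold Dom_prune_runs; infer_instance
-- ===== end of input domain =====

-- B fuses A's two passes (group-building pass + averaging pass) into one pass over
-- running sum/count/last-value accumulators (objective: simpler, same O(n) cost).


-- ===== PORT A =====
-- loop body of A: state = (pruned, new_set)
def pvStepA (st : List (List Int) × List Int) (r : Int) : List (List Int) × List Int :=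
  if st.2.length = 0 then (st.1, st.2 ++ [r])
  else if |st.2.getD (st.2.length - 1) 0 - r| ≤ 2 then (st.1, st.2 ++ [r])  -- index is in range here
  else (st.1 ++ [st.2], [])

-- int(float(sum(s))/len(s)) ported as truncation-toward-zero integer division (what it
-- computes when the float arithmetic is exact; Pre_ excludes the len(s)=0 ZeroDivisionError case)
def prune_runs (runs : List Int) : List Int :=
  let st := runs.foldl pvStepA ([], [])
  (st.1 ++ [st.2]).map (fun s => Int.tdiv s.sum (s.length : Int))

-- ===== PORT B =====
-- loop body of B: state = (final_runs, cur_sum, cur_cnt, prev)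
def pvStepB (st : List Int × Int × Int × Int) (r : Int) : List Int × Int × Int × Int :=
  match st with
  | (acc, cs, cc, prev) =>
    if cc = 0 then (acc, r, 1, r)
    else if |prev - r| ≤ 2 then (acc, cs + r, cc + 1, r)
    else (acc ++ [Int.tdiv cs cc], 0, 0, prev)

def prune_runs_alt (runs : List Int) : List Int :=
  match runs.foldl pvStepB ([], 0, 0, 0) with
  | (acc, cs, cc, _) => acc ++ [Int.tdiv cs cc]

-- ===== PRECONDITION & SPEC =====
-- Whether the LAST element of the list ends up kept in the open group (false for []):
-- an element is dropped exactly when the previous element was kept and is more than 2 away.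
def pvEndsKept : List Int → Bool
  | [] => false
  | [_] => true
  | a :: b :: rest => if |a - b| ≤ 2 then pvEndsKept (b :: rest) else pvEndsKept rest

-- Pre_ excludes exactly the inputs on which Python A raises ZeroDivisionError (empty input,
-- or the last element closes a group and is dropped, leaving the final group empty);
-- Python B raises the same error on exactly those inputs.
def Pre_prune_runs (runs : List Int) : Prop := pvEndsKept runs = true
instance (runs : List Int) : Decidable (Pre_prune_runs runs) := by unfold Pre_prune_runs; infer_instance

def pvWitness_prune_runs : List Int := [1, 2, 10, 11]

def Spec_prune_runs (runs : List Int) (out : List Int) : Prop := out = prune_runs_alt runs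
instance (runs : List Int) (out : List Int) : Decidable (Spec_prune_runs runs out) := by unfold Spec_prune_runs; infer_instance

-- ===== CLAIM (what is proved, stated in full; the proofs are below) =====
def Claim_equal_prune_runs : Prop := ∀ (runs : List Int), Dom_prune_runs runs → Pre_prune_runs runs → Spec_prune_runs runs (prune_runs runs)

-- ===== LEMMAS AND PROOFS =====

lemma pvGetD_append_last (ns : List Int) (r : Int) :
    (ns ++ [r]).getD (ns.length + 1 - 1) 0 = r := by
  simp

-- loop invariant: A's state (pruned, ns) and B's state (map-avg pruned, ns.sum, ns.length, prev)
-- stay in correspondence and produce the same final list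
lemma pv_fold_inv : ∀ (runs : List Int) (pruned : List (List Int)) (ns : List Int) (prev : Int),
    (ns ≠ [] → ns.getD (ns.length - 1) 0 = prev) →
    (let stA := runs.foldl pvStepA (pruned, ns)
     let stB := runs.foldl pvStepB
        (pruned.map (fun s => Int.tdiv s.sum (s.length : Int)), ns.sum, (ns.length : Int), prev)
     (stA.1 ++ [stA.2]).map (fun s => Int.tdiv s.sum (s.length : Int))
       = stB.1 ++ [Int.tdiv stB.2.1 stB.2.2.1]) := by
  intro runs
  induction runs with
  | nil => intro pruned ns prev _; simp
  | cons r rest ih =>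
    intro pruned ns prev hprev
    simp only [List.foldl_cons]
    cases ns with
    | nil =>
      have hA : pvStepA (pruned, []) r = (pruned, [r]) := by simp [pvStepA]
      have hB : pvStepB (pruned.map (fun s => Int.tdiv s.sum (s.length : Int)),
          List.sum ([] : List Int), ((List.length ([] : List Int)) : Int), prev) r
          = (pruned.map (fun s => Int.tdiv s.sum (s.length : Int)), r, 1, r) := by
        simp [pvStepB]
      rw [hA, hB]
      have := ih pruned [r] r (by intro _; simp)
      simpa using this
    | cons a ns' =>
      have hp2 : (a :: ns')[ns'.length] = prev := by simpa using hprev (by simp)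
      by_cases hc : |prev - r| ≤ 2
      · have hA : pvStepA (pruned, a :: ns') r = (pruned, (a :: ns') ++ [r]) := by
          simp [pvStepA, hp2, hc]
        have hcc : (((a :: ns').length : Nat) : Int) ≠ 0 := by simp; omega
        have hB : pvStepB (pruned.map (fun s => Int.tdiv s.sum (s.length : Int)),
            (a :: ns').sum, (((a :: ns').length : Nat) : Int), prev) r
            = (pruned.map (fun s => Int.tdiv s.sum (s.length : Int)),
               (a :: ns').sum + r, (((a :: ns').length : Nat) : Int) + 1, r) := by
          simp only [pvStepB]
          rw [if_neg hcc, if_pos hc]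
        rw [hA, hB]
        have := ih pruned ((a :: ns') ++ [r]) r
          (by intro _; simpa using pvGetD_append_last (a :: ns') r)
        simpa [add_comm, add_left_comm, add_assoc] using this
      · have hA : pvStepA (pruned, a :: ns') r = (pruned ++ [a :: ns'], []) := by
          simp [pvStepA, hp2, hc]
        have hcc : (((a :: ns').length : Nat) : Int) ≠ 0 := by simp; omega
        have hB : pvStepB (pruned.map (fun s => Int.tdiv s.sum (s.length : Int)),
            (a :: ns').sum, (((a :: ns').length : Nat) : Int), prev) r
            = (pruned.map (fun s => Int.tdiv s.sum (s.length : Int))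
                ++ [Int.tdiv (a :: ns').sum (((a :: ns').length : Nat) : Int)], 0, 0, prev) := by
          simp only [pvStepB]
          rw [if_neg hcc, if_neg hc]
        rw [hA, hB]
        have := ih (pruned ++ [a :: ns']) [] prev (fun h => absurd rfl h)
        simpa using this

lemma pv_total_eq (runs : List Int) : prune_runs runs = prune_runs_alt runs := by
  have h := pv_fold_inv runs [] [] 0 (by intro h; exact absurd rfl h)
  simp only [List.map_nil, List.sum_nil, List.length_nil, Nat.cast_zero] at h
  unfold prune_runs prune_runs_alt
  rcases hsB : runs.foldl pvStepB ([], 0, 0, 0) with ⟨acc, cs, cc, p⟩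
  simp only [hsB] at h ⊢
  exact h

-- ===== VERDICT (by name: the statement is the Claim_ definition above) =====
theorem prune_runs_spec : Claim_equal_prune_runs := by
  intro runs _ _
  unfold Spec_prune_runs
  exact pv_total_eq runs
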